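-- pv_equiv track=rewrite | github.com/susiegriggo/Phynteny | phynteny_utils/format_data.py | count_direction
-- ===== SOURCE A (Python) =====
-- def count_direction(sense):
--     """
--     Count the number of genes which have occured with the same orientation
--
--     param sense: Determine the number of sequences which have occured in the same direction.
--     return: List of counts of genes occuring with the same orientation
--     """
--
--     direction_count = []
--     counter = 0
--
--     for i in range(len(sense) - 1):
--
--         if sense[i] == sense[i + 1]:
--             counter += 1
--
--         else:
--             counter = 0
--
--         direction_count.append(counter)
--
--     return direction_count
-- ===== SOURCE B (Python) =====
-- from itertools import groupby
--
--
-- def count_direction(sense):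
--     # lengths of maximal runs of equal consecutive orientations
--     groups = [len(list(g)) for _, g in groupby(sense)]
--     if not groups:
--         return []
--     out = list(range(1, groups[0]))
--     for k in groups[1:]:
--         out.append(0)
--         out.extend(range(1, k))
--     return out
-- ===== Notes on version B (the rewrite author's own statement) =====
-- stated objective: alternative
-- what changed: B first builds the maximal runs of equal consecutive orientations with itertools.groupby and then emits, per run, a boundary 0 (except before the first run) followed by 1..len-1, instead of A's index loop over adjacent pairs with a running counter.
import Mathlib
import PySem

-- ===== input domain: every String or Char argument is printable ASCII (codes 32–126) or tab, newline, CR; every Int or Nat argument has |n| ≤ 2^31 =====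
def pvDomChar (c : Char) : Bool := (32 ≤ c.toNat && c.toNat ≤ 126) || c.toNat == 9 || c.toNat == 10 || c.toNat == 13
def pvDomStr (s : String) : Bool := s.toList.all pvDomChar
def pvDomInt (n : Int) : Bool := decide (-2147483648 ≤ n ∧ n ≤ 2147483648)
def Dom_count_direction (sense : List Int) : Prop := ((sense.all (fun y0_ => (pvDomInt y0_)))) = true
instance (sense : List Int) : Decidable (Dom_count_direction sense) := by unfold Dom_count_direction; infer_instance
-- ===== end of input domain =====

-- B rebuilds the output from maximal runs of equal consecutive elements (groupby) instead of A's
-- pairwise running counter; objective: alternative decomposition, same cost.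

-- ===== PORT A =====
def pvStepA (s : List Int) (st : List Int × Int) (i : Int) : List Int × Int :=
  let counter := if PySem.List.pyGet? s i = PySem.List.pyGet? s (i + 1) then st.2 + 1 else 0
  (st.1 ++ [counter], counter)

def count_direction (sense : List Int) : List Int :=
  ((PySem.List.pyRange 0 ((sense.length : Int) - 1) 1).foldl (pvStepA sense) ([], 0)).1

-- ===== PORT B =====
-- port of itertools.groupby on the orientations: list of (run value, run length)
def pvGroupsStep (x : Int) : List (Int × Nat) → List (Int × Nat)
  | (y, k) :: gs => if x = y then (y, k + 1) :: gs else (x, 1) :: (y, k) :: gs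
  | [] => [(x, 1)]

def pvGroups : List Int → List (Int × Nat)
  | [] => []
  | x :: xs => pvGroupsStep x (pvGroups xs)

-- list(range(1, k))
def pvRamp (k : Nat) : List Int := (List.range (k - 1)).map (fun i : Nat => (i : Int) + 1)

def count_direction_alt (sense : List Int) : List Int :=
  match pvGroups sense with
  | [] => []
  | (_, k) :: gs => gs.foldl (fun acc g => (acc ++ [(0 : Int)]) ++ pvRamp g.2) (pvRamp k)

-- ===== PRECONDITION & SPEC =====
def Spec_count_direction (sense : List Int) (out : List Int) : Prop := out = count_direction_alt sense
instance (sense : List Int) (out : List Int) : Decidable (Spec_count_direction sense out) := by unfold Spec_count_direction; infer_instance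

-- ===== CLAIM (what is proved, stated in full; the proofs are below) =====
def Claim_equal_count_direction : Prop := ∀ (sense : List Int), Dom_count_direction sense → Spec_count_direction sense (count_direction sense)

-- ===== LEMMAS AND PROOFS =====

-- A's loop, structurally: previous element, current counter, remaining elements
def countA : Int → Int → List Int → List Int
  | _, _, [] => []
  | p, c, x :: xs =>
    let c' := if p = x then c + 1 else 0
    c' :: countA x c' xs

-- [c+1, …, c+k-1]
def rampFrom (c : Int) (k : Nat) : List Int := (List.range (k - 1)).map (fun i : Nat => c + (i : Int) + 1)

def emitRest : List (Int × Nat) → List Int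
  | [] => []
  | (_, k) :: gs => (0 :: pvRamp k) ++ emitRest gs

lemma pvRamp_eq_rampFrom (k : Nat) : pvRamp k = rampFrom 0 k := by
  unfold pvRamp rampFrom
  apply List.map_congr_left; intro i _; ring

lemma rampFrom_succ (c : Int) (m : Nat) (h : 1 ≤ m) :
    rampFrom c (m + 1) = (c + 1) :: rampFrom (c + 1) m := by
  apply List.ext_getElem
  · simp [rampFrom]; omega
  · intro i h1 h2
    simp only [rampFrom, Nat.add_sub_cancel, List.length_map, List.length_range] at h1 h2 ⊢
    rcases i with _ | j
    · simp only [List.getElem_map, List.getElem_range, List.getElem_cons_zero]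
      push_cast; ring
    · have hj : j < m - 1 := by simp at h2; omega
      simp only [List.getElem_cons_succ, List.getElem_map, List.getElem_range]
      push_cast
      ring

lemma pvGroups_cons_head (x : Int) (xs : List Int) :
    ∃ k gs, pvGroups (x :: xs) = (x, k) :: gs ∧ 1 ≤ k := by
  cases h : pvGroups xs with
  | nil => exact ⟨1, [], by simp [pvGroups, pvGroupsStep, h], le_refl 1⟩
  | cons p gs =>
    obtain ⟨y, k⟩ := p
    by_cases hxy : x = y
    · subst hxy
      exact ⟨k + 1, gs, by simp [pvGroups, pvGroupsStep, h], by omega⟩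
    · exact ⟨1, (y, k) :: gs, by simp [pvGroups, pvGroupsStep, h, hxy], le_refl 1⟩

lemma countA_emit : ∀ (xs : List Int) (x c : Int),
    countA x c xs =
      (match pvGroups (x :: xs) with
       | [] => []
       | (_, k) :: gs => rampFrom c k ++ emitRest gs) := by
  intro xs
  induction xs with
  | nil =>
    intro x c
    simp [countA, pvGroups, pvGroupsStep, rampFrom, emitRest]
  | cons y ys ih =>
    intro x c
    obtain ⟨m, gs, hg, hm⟩ := pvGroups_cons_head y ys
    by_cases hxy : x = y
    · subst hxy
      have hstep : pvGroups (x :: x :: ys) = (x, m + 1) :: gs := by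
        rw [show pvGroups (x :: x :: ys) = pvGroupsStep x (pvGroups (x :: ys)) from rfl, hg]
        simp [pvGroupsStep]
      rw [hstep]
      simp only [countA, if_true]
      rw [ih x (c + 1), hg, rampFrom_succ c m hm]
      simp
    · have hstep : pvGroups (x :: y :: ys) = (x, 1) :: (y, m) :: gs := by
        rw [show pvGroups (x :: y :: ys) = pvGroupsStep x (pvGroups (y :: ys)) from rfl, hg]
        simp [pvGroupsStep, hxy]
      rw [hstep]
      simp only [countA]
      rw [if_neg hxy, ih y 0, hg]
      simp [rampFrom, emitRest, pvRamp_eq_rampFrom]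

lemma foldl_emitRest : ∀ (gs : List (Int × Nat)) (init : List Int),
    gs.foldl (fun acc g => (acc ++ [(0 : Int)]) ++ pvRamp g.2) init = init ++ emitRest gs := by
  intro gs
  induction gs with
  | nil => intro init; simp [emitRest]
  | cons g gs ih =>
    intro init
    obtain ⟨v, k⟩ := g
    rw [List.foldl_cons, ih]
    simp [emitRest]

lemma alt_eq_countA : ∀ (sense : List Int),
    count_direction_alt sense =
      (match sense with
       | [] => []
       | x :: xs => countA x 0 xs) := by
  intro sense
  cases sense with
  | nil => simp [count_direction_alt, pvGroups]
  | cons x xs =>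
    show count_direction_alt (x :: xs) = countA x 0 xs
    obtain ⟨k, gs, hg, _⟩ := pvGroups_cons_head x xs
    rw [countA_emit xs x 0, hg]
    simp only [count_direction_alt, hg]
    rw [foldl_emitRest, pvRamp_eq_rampFrom]

lemma bridgeA (s : List Int) : ∀ (n a : Nat) (acc : List Int) (c : Int),
    a < s.length → n = s.length - 1 - a →
    ((PySem.List.pyRange (a : Int) ((s.length : Int) - 1) 1).foldl (pvStepA s) (acc, c)).1
      = acc ++ countA (s.getD a 0) c (s.drop (a + 1)) := by
  intro n
  induction n with
  | zero =>
    intro a acc c ha hn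
    have ha' : a = s.length - 1 := by omega
    have hnil : PySem.List.pyRange (a : Int) ((s.length : Int) - 1) 1 = [] := by
      apply PySem.List.pyRange_one_eq_nil; omega
    rw [hnil]
    have : s.drop (a + 1) = [] := by
      apply List.drop_eq_nil_of_le; omega
    simp [this, countA]
  | succ n ih =>
    intro a acc c ha hn
    have halt : a + 1 < s.length := by omega
    have hcons : PySem.List.pyRange (a : Int) ((s.length : Int) - 1) 1
        = (a : Int) :: PySem.List.pyRange ((a : Int) + 1) ((s.length : Int) - 1) 1 := by
      apply PySem.List.pyRange_one_cons; omega
    rw [hcons, List.foldl_cons]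
    have hget1 : PySem.List.pyGet? s (a : Int) = some (s.getD a 0) := by
      rw [PySem.List.pyGet?_natCast, List.getElem?_eq_getElem ha, List.getD_eq_getElem s 0 ha]
    have hget2 : PySem.List.pyGet? s ((a : Int) + 1) = some (s.getD (a + 1) 0) := by
      rw [show ((a : Int) + 1) = ((a + 1 : Nat) : Int) by push_cast; ring,
        PySem.List.pyGet?_natCast, List.getElem?_eq_getElem halt, List.getD_eq_getElem s 0 halt]
    have hdrop : s.drop (a + 1) = s.getD (a + 1) 0 :: s.drop (a + 2) := by
      rw [List.getD_eq_getElem s 0 halt]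
      exact List.drop_eq_getElem_cons halt
    set c' : Int := if s.getD a 0 = s.getD (a + 1) 0 then c + 1 else 0 with hc'
    have hstep : pvStepA s (acc, c) (a : Int) = (acc ++ [c'], c') := by
      simp only [pvStepA, hget1, hget2, Option.some_inj, hc']
    rw [hstep,
      show ((a : Int) + 1) = ((a + 1 : Nat) : Int) by push_cast; ring,
      ih (a + 1) (acc ++ [c']) c' halt (by omega), hdrop]
    simp [countA, hc']

lemma a_eq_countA : ∀ (sense : List Int),
    count_direction sense =
      (match sense with
       | [] => []
       | x :: xs => countA x 0 xs) := by
  intro sense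
  cases sense with
  | nil => simp [count_direction, PySem.List.pyRange_one_eq_nil]
  | cons x xs =>
    have h := bridgeA (x :: xs) ((x :: xs).length - 1 - 0) 0 [] 0 (by simp) rfl
    simpa [count_direction] using h

-- ===== VERDICT (by name: the statement is the Claim_ definition above) =====
theorem count_direction_spec : Claim_equal_count_direction := by
  intro sense _
  unfold Spec_count_direction
  rw [a_eq_countA, alt_eq_countA]
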